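-- pv_equiv track=rewrite | github.com/kaefcatcher/wifi_lib | phy/scrambler.py | descrambler
-- ===== SOURCE A (Python) =====
-- from typing import List
--
-- def descrambler(seed: int, scrambled_bits: List[int]) -> List[int]:
--     """
--     Descramble the input data using a 7-bit LFSR descrambler based on IEEE 802.11.2020.
--
--     Parameters:
--     - seed (int): The initial seed for the descrambler (7 bits, 0-127).
--     - scrambled_bits (List[int]): The scrambled data bits to be descrambled (list of 0s and 1s).
--
--     Returns:
--     - List[int]: The descrambled data bits (list of 0s and 1s).
--     """
--
--     assert (seed >= 0 and seed <= 127), "Seed must be a 7-bit integer (0-127)."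
--
--     lfsr = [(seed >> i) & 1 for i in range(6, -1, -1)]
--
--     descrambled_bits = []
--
--     for bit in scrambled_bits:
--         new_bit = lfsr[3] ^ lfsr[6]
--         descrambled_bit = bit ^ new_bit
--         descrambled_bits.append(descrambled_bit)
--         lfsr = [new_bit] + lfsr[:-1]
--
--     return descrambled_bits
-- ===== SOURCE B (Python) =====
-- from typing import List
--
-- def descrambler(seed: int, scrambled_bits: List[int]) -> List[int]:
--     """Table-driven additive descrambler: the 7-bit LFSR keystream is
--     input-independent and periodic with period dividing 127, so precompute
--     one full 127-bit period of the keystream once, then descramble by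
--     XORing each input bit against the table entry at its index mod 127."""
--     assert (seed >= 0 and seed <= 127), "Seed must be a 7-bit integer (0-127)."
--
--     # One full period of the keystream (independent of the input length).
--     table = []
--     state = seed
--     for _ in range(127):
--         k = ((state >> 3) & 1) ^ (state & 1)
--         table.append(k)
--         state = (k << 6) | (state >> 1)
--
--     # Descramble by modular indexing into the fixed table.
--     return [b ^ table[i % 127] for i, b in enumerate(scrambled_bits)]
-- ===== Notes on version B (the rewrite author's own statement) =====
-- stated objective: alternative
-- what changed: B exploits that the LFSR keystream is input-independent and periodic with period dividing 127: it precomputes one fixed 127-entry keystream table (independent of the input length), then descrambles by XORing each bit with the table entry at its index mod 127, instead of A's per-bit interleaved register update.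
import Mathlib
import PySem

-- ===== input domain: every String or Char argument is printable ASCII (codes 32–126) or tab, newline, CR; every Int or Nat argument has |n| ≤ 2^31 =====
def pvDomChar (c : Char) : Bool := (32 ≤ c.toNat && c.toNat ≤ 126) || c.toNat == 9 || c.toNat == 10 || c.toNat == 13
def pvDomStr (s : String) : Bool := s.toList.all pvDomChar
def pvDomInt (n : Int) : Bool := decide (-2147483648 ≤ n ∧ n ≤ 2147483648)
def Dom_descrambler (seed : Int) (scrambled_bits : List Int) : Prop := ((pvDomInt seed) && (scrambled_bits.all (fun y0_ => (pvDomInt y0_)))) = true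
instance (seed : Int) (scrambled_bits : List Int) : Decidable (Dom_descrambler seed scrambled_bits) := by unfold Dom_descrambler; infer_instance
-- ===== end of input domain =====

-- B precomputes one full 127-bit period of the input-independent LFSR keystream,
-- then descrambles by XOR against the table entry at index mod 127 (alternative decomposition, same cost).

-- ===== PORT A =====
-- A's loop: list register lfsr, output appended per bit, register rebuilt as [new_bit] + lfsr[:-1].
-- lfsr[3] / lfsr[6] are always in range (7-stage register), so pyGet? never returns none; .getD 0 is never taken.
def descramblerLoopA (lfsr : List Int) (acc : List Int) (bits : List Int) : List Int :=
  match bits with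
  | [] => acc
  | bit :: rest =>
    let newBit := PySem.Int.bxor ((PySem.List.pyGet? lfsr 3).getD 0) ((PySem.List.pyGet? lfsr 6).getD 0)
    let d := PySem.Int.bxor bit newBit
    descramblerLoopA (newBit :: PySem.List.slice lfsr none (some (-1))) (acc ++ [d]) rest

def descrambler (seed : Int) (scrambled_bits : List Int) : List Int :=
  -- assert 0 ≤ seed ≤ 127 is Pre_descrambler
  descramblerLoopA ((PySem.List.pyRange 6 (-1) (-1)).map (fun i => PySem.Int.band (seed >>> i.toNat) 1)) [] scrambled_bits

-- ===== PORT B =====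
-- B's table pass: 127 iterations of the 7-bit register held as an int.
def tableLoopB (state : Int) (n : Nat) : List Int :=
  match n with
  | 0 => []
  | Nat.succ m =>
    let k := PySem.Int.bxor (PySem.Int.band (state >>> 3) 1) (PySem.Int.band state 1)
    k :: tableLoopB (PySem.Int.bor (k <<< 6) (state >>> 1)) m

def descrambler_alt (seed : Int) (scrambled_bits : List Int) : List Int :=
  -- assert 0 ≤ seed ≤ 127 is Pre_descrambler
  let table := tableLoopB seed 127
  -- table[i % 127]: index is always 0..126, in range for the 127-entry table, so .getD 0 is never taken
  (PySem.List.enumerate scrambled_bits).map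
    (fun ib => PySem.Int.bxor ib.2 ((PySem.List.pyGet? table (PySem.Int.mod ib.1 127)).getD 0))

-- ===== PRECONDITION & SPEC =====
-- Pre_ excludes exactly the seeds on which A's (and B's) assert raises AssertionError.
def Pre_descrambler (seed : Int) (scrambled_bits : List Int) : Prop := 0 ≤ seed ∧ seed ≤ 127
instance (seed : Int) (scrambled_bits : List Int) : Decidable (Pre_descrambler seed scrambled_bits) := by unfold Pre_descrambler; infer_instance
def pvWitness_descrambler : Int × List Int := (93, [1, 0, 1, 1, 0])

def Spec_descrambler (seed : Int) (scrambled_bits : List Int) (out : List Int) : Prop := out = descrambler_alt seed scrambled_bits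
instance (seed : Int) (scrambled_bits : List Int) (out : List Int) : Decidable (Spec_descrambler seed scrambled_bits out) := by unfold Spec_descrambler; infer_instance

-- ===== CLAIM (what is proved, stated in full; the proofs are below) =====
def Claim_equal_descrambler : Prop := ∀ (seed : Int) (scrambled_bits : List Int), Dom_descrambler seed scrambled_bits → Pre_descrambler seed scrambled_bits → Spec_descrambler seed scrambled_bits (descrambler seed scrambled_bits)

-- ===== LEMMAS AND PROOFS =====

-- B's per-step register update and output bit.
def stepB (s : Int) : Int :=
  PySem.Int.bor ((PySem.Int.bxor (PySem.Int.band (s >>> 3) 1) (PySem.Int.band s 1)) <<< 6) (s >>> 1)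
def outB (s : Int) : Int :=
  PySem.Int.bxor (PySem.Int.band (s >>> 3) 1) (PySem.Int.band s 1)

def iterN : Nat → Int → Int
  | 0, s => s
  | Nat.succ n, s => iterN n (stepB s)

lemma tableLoopB_succ (s : Int) (m : Nat) :
    tableLoopB s (m + 1) = outB s :: tableLoopB (stepB s) m := rfl

lemma tableLoopB_length (s : Int) (n : Nat) : (tableLoopB s n).length = n := by
  induction n generalizing s with
  | zero => rfl
  | succ m ih => rw [tableLoopB_succ]; simp [ih]

lemma tableLoopB_get (s : Int) (n i : Nat) (h : i < n) :
    (tableLoopB s n)[i]? = some (outB (iterN i s)) := by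
  induction n generalizing s i with
  | zero => omega
  | succ m ih =>
    rw [tableLoopB_succ]
    cases i with
    | zero => simp [iterN]
    | succ j => simpa [iterN] using ih (stepB s) j (by omega)

-- A's list register as a function of B's int register (bit 6 first … bit 0 last).
def bitsOf (s : Int) : List Int :=
  (PySem.List.pyRange 6 (-1) (-1)).map (fun i => PySem.Int.band (s >>> i.toNat) 1)

-- Bridge a fact checked on Fin 128 to any integer in [0, 128).
lemma of_fin128 {P : Int → Prop} (h : ∀ t : Fin 128, P (t.1 : Int)) :
    ∀ s : Int, 0 ≤ s → s < 128 → P s := by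
  intro s h0 h1
  have := h ⟨s.toNat, by omega⟩
  simpa [Int.toNat_of_nonneg h0] using this

-- Per-step agreement of the two registers, checked over all 128 states.
lemma step_newBit : ∀ t : Fin 128,
    PySem.Int.bxor ((PySem.List.pyGet? (bitsOf (t.1 : Int)) 3).getD 0) ((PySem.List.pyGet? (bitsOf (t.1 : Int)) 6).getD 0)
      = outB (t.1 : Int) := by decide

lemma step_shift : ∀ t : Fin 128,
    outB (t.1 : Int) :: PySem.List.slice (bitsOf (t.1 : Int)) none (some (-1)) = bitsOf (stepB (t.1 : Int)) := by decide

lemma step_range : ∀ t : Fin 128, 0 ≤ stepB (t.1 : Int) ∧ stepB (t.1 : Int) < 128 := by decide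

set_option maxRecDepth 100000 in
set_option maxHeartbeats 4000000 in
lemma period127 : ∀ t : Fin 128, iterN 127 (t.1 : Int) = (t.1 : Int) := by decide

lemma iterN_add (a b : Nat) (s : Int) : iterN (a + b) s = iterN b (iterN a s) := by
  induction a generalizing s with
  | zero => simp [iterN]
  | succ m ih =>
    have : Nat.succ m + b = Nat.succ (m + b) := by omega
    rw [this, iterN, iterN, ih]

set_option maxRecDepth 40000 in
lemma iterN_mod (i : Nat) (s : Int) (h0 : 0 ≤ s) (h1 : s < 128) :
    iterN i s = iterN (i % 127) s := by
  induction i using Nat.strong_induction_on with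
  | _ i ih =>
    by_cases h : i < 127
    · rw [Nat.mod_eq_of_lt h]
    · have hi : i = 127 + (i - 127) := by omega
      have hp := of_fin128 (P := fun s => iterN 127 s = s) period127 s h0 h1
      rw [hi, iterN_add, hp, ih (i - 127) (by omega)]
      congr 1
      omega

-- A's interleaved loop produces bits[i] XOR outB(iterN i seed), streamed.
lemma loop_eq : ∀ (bits : List Int) (s : Int) (acc : List Int), 0 ≤ s → s < 128 →
    descramblerLoopA (bitsOf s) acc bits
      = acc ++ List.zipWith (fun b k => PySem.Int.bxor b k) bits (tableLoopB s bits.length) := by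
  intro bits
  induction bits with
  | nil => intro s acc _ _; simp [descramblerLoopA]
  | cons bit rest ih =>
    intro s acc h0 h1
    have h1' := of_fin128 (P := fun s =>
      PySem.Int.bxor ((PySem.List.pyGet? (bitsOf s) 3).getD 0) ((PySem.List.pyGet? (bitsOf s) 6).getD 0)
        = outB s) step_newBit s h0 h1
    have h2' := of_fin128 (P := fun s =>
      outB s :: PySem.List.slice (bitsOf s) none (some (-1)) = bitsOf (stepB s)) step_shift s h0 h1
    have h3' := of_fin128 (P := fun s => 0 ≤ stepB s ∧ stepB s < 128) step_range s h0 h1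
    rw [descramblerLoopA]
    simp only [h1', h2']
    rw [ih _ _ h3'.1 h3'.2]
    show _ = acc ++ List.zipWith (fun b k => PySem.Int.bxor b k) (bit :: rest) (tableLoopB s (rest.length + 1))
    rw [tableLoopB_succ]
    simp [outB, stepB, List.append_assoc]

-- B's modular-table pass equals the streamed keystream XOR.
lemma alt_eq_stream (seed : Int) (bits : List Int) (h0 : 0 ≤ seed) (h1 : seed < 128) :
    descrambler_alt seed bits
      = List.zipWith (fun b k => PySem.Int.bxor b k) bits (tableLoopB seed bits.length) := by
  unfold descrambler_alt
  apply List.ext_getElem?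
  intro i
  by_cases h : i < bits.length
  · have h127 : (0:Int) < 127 := by norm_num
    have hget : (PySem.List.pyGet? (tableLoopB seed 127) ((i : Int) % 127)).getD 0
        = outB (iterN i seed) := by
      rw [(by omega : ((i:Int) % 127) = ((i % 127 : Nat) : Int)), PySem.List.pyGet?_natCast,
        tableLoopB_get seed 127 (i % 127) (Nat.mod_lt _ (by norm_num)),
        ← iterN_mod i seed h0 h1]
      rfl
    simp only [List.getElem?_map, PySem.List.getElem?_enumerate, List.getElem?_zipWith,
      tableLoopB_get seed bits.length i h, List.getElem?_eq_getElem h, Option.map_some]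
    simp [hget]
  · have hl : (PySem.List.enumerate bits).length = bits.length := by
      simp [PySem.List.length_enumerate]
    rw [List.getElem?_eq_none, List.getElem?_eq_none]
    · simp [tableLoopB_length]; omega
    · simp [hl]; omega

theorem descrambler_eq_alt (seed : Int) (scrambled_bits : List Int)
    (h : Pre_descrambler seed scrambled_bits) :
    descrambler seed scrambled_bits = descrambler_alt seed scrambled_bits := by
  obtain ⟨h0, h1⟩ := h
  rw [alt_eq_stream seed scrambled_bits h0 (by omega)]
  have := loop_eq scrambled_bits seed [] h0 (by omega)
  simpa [descrambler, bitsOf] using this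

-- ===== VERDICT (by name: the statement is the Claim_ definition above) =====
theorem descrambler_spec : Claim_equal_descrambler := by
  intro seed scrambled_bits _ hpre
  exact descrambler_eq_alt seed scrambled_bits hpre
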